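-- pv_equiv track=rewrite | github.com/lraulin/algorithms | py/wave_sorting.py | WaveSorting
-- ===== SOURCE A (Python) =====
-- import math
--
-- def WaveSorting(arr):
--     sortedarr = sorted(arr)
--     midpoint = int(math.floor(len(sortedarr)/2))
--     arr0 = sortedarr[0:midpoint]
--     arr1 = sortedarr[midpoint:]
--     wavearr = []
--     for i in range(len(arr1)):
--         wavearr.append(arr1[i])
--         if i < len(arr0):
--             wavearr.append(arr0[i])
--     for j in range(len(wavearr)-1):
--         if j % 2 == 0:
--             if not wavearr[j] > wavearr[j+1]:
--                 return 'false'
--         else: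
--             if not wavearr[j] < wavearr[j+1]:
--                 return 'false'
--     return 'true'
-- ===== SOURCE B (Python) =====
-- def WaveSorting(arr):
--     s = sorted(arr)
--     m = len(s) // 2
--     lo, hi = s[:m], s[m:]
--     for i in range(m):
--         if hi[i] <= lo[i]:
--             return 'false'
--         if i + 1 < len(hi) and lo[i] >= hi[i + 1]:
--             return 'false'
--     return 'true'
-- ===== Notes on version B (the rewrite author's own statement) =====
-- stated objective: simpler
-- what changed: B never builds the interleaved wave array: it checks the wave property directly on the two sorted halves in a single index loop (hi[i] > lo[i] and lo[i] < hi[i+1]), where A first constructs wavearr by interleaving and then scans it with even/odd index cases.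
import Mathlib
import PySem

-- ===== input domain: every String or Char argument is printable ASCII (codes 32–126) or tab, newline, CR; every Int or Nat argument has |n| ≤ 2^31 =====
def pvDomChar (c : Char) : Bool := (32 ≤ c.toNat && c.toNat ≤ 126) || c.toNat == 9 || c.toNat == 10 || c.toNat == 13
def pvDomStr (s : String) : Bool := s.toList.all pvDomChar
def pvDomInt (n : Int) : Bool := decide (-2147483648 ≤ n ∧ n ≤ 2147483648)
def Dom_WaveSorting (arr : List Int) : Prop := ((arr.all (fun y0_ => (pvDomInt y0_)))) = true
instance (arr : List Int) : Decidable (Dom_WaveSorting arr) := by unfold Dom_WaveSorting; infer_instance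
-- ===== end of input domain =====

-- B verifies the wave property directly on the two sorted halves in one index loop,
-- never materialising the interleaved wave array (objective: simpler; same asymptotic cost).

-- ===== PORT A =====
-- first loop of A: builds wavearr (indices i are always in range, so pyGetD's default is never read)
def pvWaveBuild (arr1 arr0 : List Int) : List Int :=
  (PySem.List.pyRange 0 (arr1.length : Int) 1).foldl (fun wavearr i =>
    let wavearr := wavearr ++ [PySem.List.pyGetD arr1 i 0]
    if i < (arr0.length : Int) then wavearr ++ [PySem.List.pyGetD arr0 i 0] else wavearr) []

-- second loop of A with its early returns, as recursion over the index list
def pvWaveCheck (wavearr : List Int) : List Int → String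
  | [] => "true"
  | j :: rest =>
    if PySem.Int.mod j 2 = 0 then
      if ¬ (PySem.List.pyGetD wavearr j 0 > PySem.List.pyGetD wavearr (j + 1) 0) then "false"
      else pvWaveCheck wavearr rest
    else
      if ¬ (PySem.List.pyGetD wavearr j 0 < PySem.List.pyGetD wavearr (j + 1) 0) then "false"
      else pvWaveCheck wavearr rest

-- int(math.floor(len(sortedarr)/2)) = floor division by 2 (length is nonnegative), exact here
def WaveSorting (arr : List Int) : String :=
  let sortedarr := PySem.List.sorted arr (fun x => x) false
  let midpoint := PySem.Int.floordiv (sortedarr.length : Int) 2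
  let arr0 := PySem.List.slice sortedarr (some 0) (some midpoint)
  let arr1 := PySem.List.slice sortedarr (some midpoint) none
  let wavearr := pvWaveBuild arr1 arr0
  pvWaveCheck wavearr (PySem.List.pyRange 0 ((wavearr.length : Int) - 1) 1)

-- ===== PORT B =====
-- B's single loop with its early returns, as recursion over the index list
def pvAltLoop (lo hi : List Int) : List Int → String
  | [] => "true"
  | i :: rest =>
    if PySem.List.pyGetD hi i 0 ≤ PySem.List.pyGetD lo i 0 then "false"
    else if i + 1 < (hi.length : Int) ∧ PySem.List.pyGetD lo i 0 ≥ PySem.List.pyGetD hi (i + 1) 0 then "false"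
    else pvAltLoop lo hi rest

def WaveSorting_alt (arr : List Int) : String :=
  let s := PySem.List.sorted arr (fun x => x) false
  let m := PySem.Int.floordiv (s.length : Int) 2
  let lo := PySem.List.slice s (some 0) (some m)
  let hi := PySem.List.slice s (some m) none
  pvAltLoop lo hi (PySem.List.pyRange 0 m 1)

-- ===== PRECONDITION & SPEC =====
def Spec_WaveSorting (arr : List Int) (out : String) : Prop := out = WaveSorting_alt arr
instance (arr : List Int) (out : String) : Decidable (Spec_WaveSorting arr out) := by unfold Spec_WaveSorting; infer_instance

-- ===== CLAIM (what is proved, stated in full; the proofs are below) =====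
def Claim_equal_WaveSorting : Prop := ∀ (arr : List Int), Dom_WaveSorting arr → Spec_WaveSorting arr (WaveSorting arr)

-- ===== LEMMAS AND PROOFS =====

-- proof-side model of A's wavearr
def pvInterleave : List Int → List Int → List Int
  | [], _ => []
  | y :: hi, [] => y :: hi
  | y :: hi, x :: lo => y :: x :: pvInterleave hi lo

def pvPassA (w : List Int) (j : Int) : Bool :=
  if PySem.Int.mod j 2 = 0 then decide (PySem.List.pyGetD w j 0 > PySem.List.pyGetD w (j + 1) 0)
  else decide (PySem.List.pyGetD w j 0 < PySem.List.pyGetD w (j + 1) 0)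

def pvPassB (lo hi : List Int) (i : Int) : Bool :=
  !decide (PySem.List.pyGetD hi i 0 ≤ PySem.List.pyGetD lo i 0) &&
  !decide (i + 1 < (hi.length : Int) ∧ PySem.List.pyGetD lo i 0 ≥ PySem.List.pyGetD hi (i + 1) 0)

theorem pvWaveCheck_eq_all (w : List Int) (js : List Int) :
    pvWaveCheck w js = if js.all (pvPassA w) then "true" else "false" := by
  induction js with
  | nil => simp [pvWaveCheck]
  | cons j rest ih =>
    simp only [pvWaveCheck, ih, List.all_cons, pvPassA, Bool.and_eq_true]
    split_ifs <;> simp_all <;> omega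

theorem pvAltLoop_eq_all (lo hi : List Int) (is : List Int) :
    pvAltLoop lo hi is = if is.all (pvPassB lo hi) then "true" else "false" := by
  induction is with
  | nil => simp [pvAltLoop]
  | cons i rest ih =>
    simp only [pvAltLoop, ih, List.all_cons, pvPassB, Bool.and_eq_true, Bool.not_eq_true',
      decide_eq_false_iff_not]
    split_ifs <;> simp_all

theorem pvInterleave_nil (hi : List Int) : pvInterleave hi [] = hi := by
  cases hi <;> rfl

theorem pvInterleave_length (hi : List Int) : ∀ lo : List Int, lo.length ≤ hi.length →
    (pvInterleave hi lo).length = hi.length + lo.length := by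
  induction hi with
  | nil => intro lo h; simp at h; simp [h, pvInterleave]
  | cons y hi ih =>
    intro lo h
    cases lo with
    | nil => simp [pvInterleave]
    | cons x lo => simp [pvInterleave, ih lo (by simpa using h)]; omega

theorem pvFlat (hi : List Int) : ∀ lo : List Int, lo.length ≤ hi.length →
    (List.range hi.length).flatMap
      (fun k => hi.getD k 0 :: if k < lo.length then [lo.getD k 0] else []) = pvInterleave hi lo := by
  induction hi with
  | nil => intro lo h; simp at h; simp [h, pvInterleave]
  | cons y hi ih =>
    intro lo h
    rw [List.length_cons, List.range_succ_eq_map, List.flatMap_cons, List.flatMap_map]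
    cases lo with
    | nil =>
      simp only [List.getD_cons_succ, List.getD_cons_zero, List.length_nil,
        Nat.not_lt_zero, if_false]
      have := ih [] (by simp)
      simp only [List.length_nil, Nat.not_lt_zero, if_false] at this
      rw [pvInterleave_nil] at this
      rw [pvInterleave_nil]
      simp only [List.getD_eq_getElem?_getD] at this
      simp [this]
    | cons x lo =>
      simp only [List.getD_cons_succ, List.getD_cons_zero, List.length_cons,
        Nat.zero_lt_succ, if_true, Nat.succ_lt_succ_iff]
      rw [ih lo (by simpa using h)]
      simp [pvInterleave]

theorem pvBuild_eq_interleave (hi lo : List Int) (h : lo.length ≤ hi.length) :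
    pvWaveBuild hi lo = pvInterleave hi lo := by
  unfold pvWaveBuild
  have hbody : (fun (wavearr : List Int) (i : Int) =>
      let wavearr := wavearr ++ [PySem.List.pyGetD hi i 0]
      if i < (lo.length : Int) then wavearr ++ [PySem.List.pyGetD lo i 0] else wavearr)
      = fun (wavearr : List Int) (i : Int) => wavearr ++
        (PySem.List.pyGetD hi i 0 :: if i < (lo.length : Int) then [PySem.List.pyGetD lo i 0] else []) := by
    funext w i; dsimp only; split_ifs <;> simp
  rw [hbody, PySem.List.foldl_append_eq_flatMap, List.nil_append, PySem.List.pyRange_one]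
  simp only [Int.sub_zero, Int.toNat_natCast, List.flatMap_map, zero_add,
    PySem.List.pyGetD_natCast, Nat.cast_lt]
  exact pvFlat hi lo h

theorem pvInter_getD_even (hi : List Int) : ∀ (lo : List Int) (k : Nat),
    lo.length ≤ hi.length → k ≤ lo.length →
    (pvInterleave hi lo).getD (2 * k) 0 = hi.getD k 0 := by
  induction hi with
  | nil => intro lo k h hk; simp at h; subst h; simp [pvInterleave]
  | cons y hi ih =>
    intro lo k h hk
    cases lo with
    | nil =>
      have : k = 0 := by simpa using hk
      simp [this, pvInterleave]
    | cons x lo =>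
      cases k with
      | zero => simp [pvInterleave]
      | succ k =>
        have h2 : 2 * (k + 1) = 2 * k + 1 + 1 := by ring
        rw [h2]
        simp only [pvInterleave, List.getD_cons_succ]
        exact ih lo k (by simpa using h) (by simpa using hk)

theorem pvInter_getD_odd (hi : List Int) : ∀ (lo : List Int) (k : Nat),
    lo.length ≤ hi.length → hi.length ≤ lo.length + 1 →
    (pvInterleave hi lo).getD (2 * k + 1) 0 = lo.getD k 0 := by
  induction hi with
  | nil => intro lo k h _; simp at h; simp [h, pvInterleave]
  | cons y hi ih =>
    intro lo k h h2
    cases lo with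
    | nil =>
      cases hi with
      | nil => simp [pvInterleave]
      | cons z hi => exfalso; simp at h2
    | cons x lo =>
      cases k with
      | zero => simp [pvInterleave]
      | succ k =>
        have he : 2 * (k + 1) + 1 = 2 * k + 1 + 1 + 1 := by ring
        rw [he]
        simp only [pvInterleave, List.getD_cons_succ]
        exact ih lo k (by simpa using h) (by simpa using h2)

-- core: A's index checks over the interleaved array ↔ B's per-half checks
theorem pvCore (hi lo : List Int) (h1 : lo.length ≤ hi.length) (h2 : hi.length ≤ lo.length + 1) :
    ((∀ k : Nat, k < hi.length + lo.length - 1 →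
        (if k % 2 = 0 then (pvInterleave hi lo).getD (k + 1) 0 < (pvInterleave hi lo).getD k 0
         else (pvInterleave hi lo).getD k 0 < (pvInterleave hi lo).getD (k + 1) 0))
     ↔ (∀ i : Nat, i < lo.length →
        lo.getD i 0 < hi.getD i 0 ∧ (i + 1 < hi.length → lo.getD i 0 < hi.getD (i + 1) 0))) := by
  constructor
  · intro h i hilt
    have e1 := pvInter_getD_even hi lo i h1 (by omega)
    have e2 := pvInter_getD_odd hi lo i h1 h2
    constructor
    · have hA := h (2 * i) (by omega)
      rw [if_pos (by omega)] at hA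
      rw [show 2 * i + 1 = 2 * i + 1 from rfl, e2, e1] at hA
      exact hA
    · intro hlt
      have hB := h (2 * i + 1) (by omega)
      rw [if_neg (by omega)] at hB
      have e3 := pvInter_getD_even hi lo (i + 1) h1 (by omega)
      rw [show 2 * (i + 1) = 2 * i + 1 + 1 by ring] at e3
      rw [e2, e3] at hB
      exact hB
  · intro h k hk
    by_cases hpar : k % 2 = 0
    · obtain ⟨i, rfl⟩ : ∃ i, k = 2 * i := ⟨k / 2, by omega⟩
      have hilt : i < lo.length := by omega
      have e1 := pvInter_getD_even hi lo i h1 (by omega)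
      have e2 := pvInter_getD_odd hi lo i h1 h2
      rw [if_pos hpar, e1, e2]
      exact (h i hilt).1
    · obtain ⟨i, rfl⟩ : ∃ i, k = 2 * i + 1 := ⟨k / 2, by omega⟩
      have hilt : i < lo.length := by omega
      have hnext : i + 1 < hi.length := by omega
      have e2 := pvInter_getD_odd hi lo i h1 h2
      have e3 := pvInter_getD_even hi lo (i + 1) h1 (by omega)
      rw [show 2 * (i + 1) = 2 * i + 1 + 1 by ring] at e3
      rw [if_neg hpar, e2, e3]
      exact (h i hilt).2 hnext

-- ===== VERDICT (by name: the statement is the Claim_ definition above) =====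
theorem WaveSorting_spec : Claim_equal_WaveSorting := by
  intro arr _
  unfold Spec_WaveSorting WaveSorting WaveSorting_alt
  simp only []
  set s := PySem.List.sorted arr (fun x => x) false with hs
  set n := s.length with hn
  have hm : PySem.Int.floordiv (n : Int) 2 = ((n / 2 : Nat) : Int) := by
    rw [PySem.Int.floordiv_eq_ediv_of_pos (by omega)]; omega
  rw [hm]
  rw [PySem.List.slice_zero_start, PySem.List.slice_to_natCast, PySem.List.slice_from_natCast]
  set lo := s.take (n / 2) with hlo
  set hi := s.drop (n / 2) with hhi
  have hlolen : lo.length = n / 2 := by simp [hlo, hn]; omega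
  have hhilen : hi.length = n - n / 2 := by simp [hhi, hn]
  have h1 : lo.length ≤ hi.length := by omega
  have h2 : hi.length ≤ lo.length + 1 := by omega
  rw [pvBuild_eq_interleave hi lo h1]
  set w := pvInterleave hi lo with hw
  have hwlen : w.length = hi.length + lo.length := pvInterleave_length hi lo h1
  rw [pvWaveCheck_eq_all, pvAltLoop_eq_all]
  have hall : ((PySem.List.pyRange 0 ((w.length : Int) - 1) 1).all (pvPassA w))
      = ((PySem.List.pyRange 0 ((n / 2 : Nat) : Int) 1).all (pvPassB lo hi)) := by
    rw [Bool.eq_iff_iff]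
    rw [PySem.List.pyRange_one, PySem.List.pyRange_one]
    simp only [List.all_map, List.all_eq_true, List.mem_range, Function.comp, Int.sub_zero,
      Int.toNat_natCast]
    have hbound : ((w.length : Int) - 1).toNat = hi.length + lo.length - 1 := by omega
    rw [hbound]
    have hA : ∀ k : Nat, (pvPassA w ((0 : Int) + (k : Int)) = true)
        ↔ (if k % 2 = 0 then w.getD (k + 1) 0 < w.getD k 0
           else w.getD k 0 < w.getD (k + 1) 0) := by
      intro k
      simp only [pvPassA, zero_add]
      have hmod : PySem.Int.mod (k : Int) 2 = ((k % 2 : Nat) : Int) := by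
        exact_mod_cast PySem.Int.mod_natCast k 2
      have hc : ((k : Int) + 1) = ((k + 1 : Nat) : Int) := by push_cast; ring
      rw [hmod, hc]
      have hcond : (((k % 2 : Nat) : Int) = 0) ↔ (k % 2 = 0) := by omega
      simp only [PySem.List.pyGetD_natCast]
      by_cases hp : k % 2 = 0
      · rw [if_pos (hcond.mpr hp), if_pos hp]
        simp only [decide_eq_true_eq, gt_iff_lt]
      · rw [if_neg (fun hh => hp (hcond.mp hh)), if_neg hp]
        simp only [decide_eq_true_eq]
    have hB : ∀ i : Nat, (pvPassB lo hi ((0 : Int) + (i : Int)) = true)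
        ↔ (lo.getD i 0 < hi.getD i 0 ∧ (i + 1 < hi.length → lo.getD i 0 < hi.getD (i + 1) 0)) := by
      intro i
      simp only [pvPassB, zero_add]
      have hc : ((i : Int) + 1) = ((i + 1 : Nat) : Int) := by push_cast; ring
      rw [hc]
      simp only [PySem.List.pyGetD_natCast, Bool.and_eq_true, Bool.not_eq_true',
        decide_eq_false_iff_not, not_le, Nat.cast_lt, ge_iff_le]
      constructor
      · rintro ⟨ha, hb⟩
        exact ⟨ha, fun hlt => lt_of_not_ge (fun hge => hb ⟨hlt, hge⟩)⟩
      · rintro ⟨ha, hb⟩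
        exact ⟨ha, fun hcon => absurd (hb hcon.1) (not_lt.mpr hcon.2)⟩
    constructor
    · intro h i hilt
      rw [hB i]
      exact (pvCore hi lo h1 h2).mp (fun k hk => (hA k).mp (h k hk)) i (by omega)
    · intro h k hk
      rw [hA k]
      exact (pvCore hi lo h1 h2).mpr (fun i hilt => (hB i).mp (h i (by omega))) k hk
  rw [hall]
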